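-- pv_equiv track=rewrite | github.com/aistairc/market-reporter | reporter/webapp/__init__.py | order_method_names_for_debug
-- ===== SOURCE A (Python) =====
-- from typing import List
--
-- def order_method_names_for_debug(method_names: List[str]) -> List[str]:
--     result = []
--     if 'Gold' in method_names:
--         result.append((0, 'Gold'))
--
--     if 'Base' in method_names:
--         result.append((1, 'Base'))
--
--     for method_name in [m for m in method_names if m not in ['Gold', 'Base']]:
--         result.append((2, method_name))
--
--     return [m for (_, m) in sorted(result)]
-- ===== SOURCE B (Python) =====
-- from typing import List
--
-- def _merge(xs: List[str], ys: List[str]) -> List[str]: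
--     out = []
--     i = j = 0
--     while i < len(xs) and j < len(ys):
--         if xs[i] <= ys[j]:
--             out.append(xs[i]); i += 1
--         else:
--             out.append(ys[j]); j += 1
--     out.extend(xs[i:])
--     out.extend(ys[j:])
--     return out
--
-- def _msort(xs: List[str]) -> List[str]:
--     if len(xs) <= 1:
--         return xs
--     mid = len(xs) // 2
--     return _merge(_msort(xs[:mid]), _msort(xs[mid:]))
--
-- def order_method_names_for_debug(method_names: List[str]) -> List[str]:
--     # One pass: flags for 'Gold'/'Base', collect the rest; then hand-written
--     # recursive merge sort on the rest (duplicates kept).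
--     has_gold = False
--     has_base = False
--     others: List[str] = []
--     for m in method_names:
--         if m == 'Gold':
--             has_gold = True
--         elif m == 'Base':
--             has_base = True
--         else:
--             others.append(m)
--     head = []
--     if has_gold:
--         head.append('Gold')
--     if has_base:
--         head.append('Base')
--     return head + _msort(others)
-- ===== Notes on version B (the rewrite author's own statement) =====
-- stated objective: alternative
-- what changed: B makes one pass recording 'Gold'/'Base' as booleans and collecting the remaining names, then sorts that remainder with a hand-written recursive merge sort, instead of A's tag-every-name-with-a-numeric-rank tuple list handed wholesale to the built-in sort.
import Mathlib
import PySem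

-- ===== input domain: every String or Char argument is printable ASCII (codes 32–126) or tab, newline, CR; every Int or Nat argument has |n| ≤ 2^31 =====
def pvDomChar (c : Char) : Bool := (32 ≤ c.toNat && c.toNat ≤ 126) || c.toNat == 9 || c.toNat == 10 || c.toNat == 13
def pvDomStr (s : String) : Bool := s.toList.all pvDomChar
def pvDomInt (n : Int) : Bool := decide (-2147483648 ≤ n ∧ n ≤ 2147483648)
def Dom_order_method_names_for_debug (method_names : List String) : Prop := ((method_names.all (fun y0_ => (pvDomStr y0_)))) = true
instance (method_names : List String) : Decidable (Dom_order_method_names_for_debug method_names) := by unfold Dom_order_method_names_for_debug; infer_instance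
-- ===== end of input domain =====

-- B replaces A's tag-with-rank-and-builtin-sort by one pass with two booleans for
-- 'Gold'/'Base' plus collecting the rest, sorted by a hand-written merge sort.

-- ===== PORT A =====
-- result starts empty, conditionally appends (0,'Gold') and (1,'Base'),
-- then appends (2, m) for each remaining m; finally sorts the tagged list
-- (Python tuple order = PySem.List.sorted2 on fst, snd) and drops the tags.
def order_method_names_for_debug (method_names : List String) : List String :=
  let r0 : List (Int × String) :=
    if method_names.contains "Gold" then [((0 : Int), "Gold")] else []
  let r1 : List (Int × String) :=
    if method_names.contains "Base" then r0 ++ [((1 : Int), "Base")] else r0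
  let result : List (Int × String) :=
    (method_names.filter (fun m => !(m == "Gold" || m == "Base"))).foldl
      (fun acc m => acc ++ [((2 : Int), m)]) r1
  (PySem.List.sorted2 result Prod.fst Prod.snd false).map Prod.snd

-- ===== PORT B =====
-- _merge of Source B: two-pointer merge of two lists (xs[i] <= ys[j] takes from xs)
def pvMerge : List String → List String → List String
  | [], ys => ys
  | x :: xs, [] => x :: xs
  | x :: xs, y :: ys =>
      if x ≤ y then x :: pvMerge xs (y :: ys) else y :: pvMerge (x :: xs) ys
termination_by xs ys => xs.length + ys.length

-- _msort of Source B: xs[:mid] / xs[mid:] with 0 ≤ mid ≤ len are List.take / List.drop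
def pvMsort (xs : List String) : List String :=
  if xs.length ≤ 1 then xs
  else pvMerge (pvMsort (xs.take (xs.length / 2))) (pvMsort (xs.drop (xs.length / 2)))
termination_by xs.length
decreasing_by
  · simp only [List.length_take]; omega
  · simp only [List.length_drop]; omega

-- one step of Source B's for-loop over the state (has_gold, has_base, others)
def pvStep (st : Bool × Bool × List String) (m : String) : Bool × Bool × List String :=
  if m == "Gold" then (true, st.2.1, st.2.2)
  else if m == "Base" then (st.1, true, st.2.2)
  else (st.1, st.2.1, st.2.2 ++ [m])

def order_method_names_for_debug_alt (method_names : List String) : List String :=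
  let st := method_names.foldl pvStep (false, false, [])
  let head0 : List String := if st.1 then ["Gold"] else []
  let head : List String := if st.2.1 then head0 ++ ["Base"] else head0
  head ++ pvMsort st.2.2

-- ===== PRECONDITION & SPEC =====
def Spec_order_method_names_for_debug (method_names : List String) (out : List String) : Prop := out = order_method_names_for_debug_alt method_names
instance (method_names : List String) (out : List String) : Decidable (Spec_order_method_names_for_debug method_names out) := by unfold Spec_order_method_names_for_debug; infer_instance

-- ===== CLAIM (what is proved, stated in full; the proofs are below) =====
def Claim_equal_order_method_names_for_debug : Prop := ∀ (method_names : List String), Dom_order_method_names_for_debug method_names → Spec_order_method_names_for_debug method_names (order_method_names_for_debug method_names)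

-- ===== LEMMAS AND PROOFS =====

-- the lexicographic 'before' used by sorted2 on (tag, name) pairs
def pvBefore (a b : Int × String) : Bool :=
  decide (a.1 < b.1) || (!decide (b.1 < a.1) && decide (a.2 < b.2))

-- the 'before' used by sorted with the identity key on strings
def pvBStr (a b : String) : Bool := decide (a < b)

def pvTag2 (m : String) : Int × String := ((2 : Int), m)

-- inserting x past a prefix it never goes before
theorem pv_insert_append (bf : Int × String → Int × String → Bool)
    (x : Int × String) (p q : List (Int × String))
    (hp : ∀ y ∈ p, bf x y = false) :
    PySem.List.insertBy bf x (p ++ q) = p ++ PySem.List.insertBy bf x q := by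
  induction p with
  | nil => rfl
  | cons y ys ih =>
    have hy : bf x y = false := hp y (by simp)
    simp [PySem.List.insertBy, hy]
    exact ih (fun z hz => hp z (by simp [hz]))

-- folding inserts past a fixed prefix h that none of the inserted elements precede
theorem pv_foldl_insert_prefix (bf : Int × String → Int × String → Bool)
    (t : List (Int × String)) (h : List (Int × String))
    (hh : ∀ x ∈ t, ∀ y ∈ h, bf x y = false) :
    ∀ init, t.foldl (fun acc x => PySem.List.insertBy bf x acc) (h ++ init)
      = h ++ t.foldl (fun acc x => PySem.List.insertBy bf x acc) init := by
  induction t with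
  | nil => intro init; rfl
  | cons x xs ih =>
    intro init
    have hx : ∀ y ∈ h, bf x y = false := hh x (by simp)
    have := pv_insert_append bf x h init hx
    simp only [List.foldl_cons, this]
    exact ih (fun z hz => hh z (by simp [hz])) _

-- on tag-2 pairs, the lexicographic 'before' is just the string comparison
theorem pv_insert_map (m : String) (l : List String) :
    PySem.List.insertBy pvBefore (pvTag2 m) (l.map pvTag2)
      = (PySem.List.insertBy pvBStr m l).map pvTag2 := by
  induction l with
  | nil => rfl
  | cons y ys ih =>
    have hb : pvBefore (pvTag2 m) (pvTag2 y) = decide (m < y) := by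
      simp [pvBefore, pvTag2]
    by_cases hmy : m < y
    · simp [List.map_cons, PySem.List.insertBy, hb, hmy, pvBStr]
    · simp [List.map_cons, PySem.List.insertBy, hb, hmy, pvBStr, ih]

theorem pv_foldl_insert_map (others : List String) :
    ∀ acc : List String,
    (others.map pvTag2).foldl (fun a x => PySem.List.insertBy pvBefore x a) (acc.map pvTag2)
      = (others.foldl (fun a m => PySem.List.insertBy pvBStr m a) acc).map pvTag2 := by
  induction others with
  | nil => intro acc; rfl
  | cons m ms ih =>
    intro acc
    simp only [List.map_cons, List.foldl_cons, pv_insert_map m acc]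
    exact ih _

-- the Python append loop of A builds init ++ map
theorem pv_foldl_append (l : List String) :
    ∀ init : List (Int × String),
    l.foldl (fun acc m => acc ++ [((2 : Int), m)]) init = init ++ l.map pvTag2 := by
  induction l with
  | nil => intro init; simp
  | cons m ms ih => intro init; simp [ih, pvTag2]

-- every element of a tag-2 list never precedes a tag-0 or tag-1 element
theorem pv_tag2_not_before (h : List (Int × String)) (hy : ∀ y ∈ h, y.1 = 0 ∨ y.1 = 1)
    (t : List String) :
    ∀ x ∈ t.map pvTag2, ∀ y ∈ h, pvBefore x y = false := by
  intro x hx y hyh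
  obtain ⟨m, _, rfl⟩ := List.mem_map.mp hx
  rcases hy y hyh with h0 | h0 <;> simp [pvBefore, pvTag2, h0]

-- sorted2 of (head-of-tags ++ tag-2 list) = head ++ mapped insertion-sorted strings
theorem pv_sorted2_split (h : List (Int × String))
    (hh : h.foldl (fun acc x => PySem.List.insertBy pvBefore x acc) [] = h)
    (hy : ∀ y ∈ h, y.1 = 0 ∨ y.1 = 1) (t : List String) :
    PySem.List.sorted2 (h ++ t.map pvTag2) Prod.fst Prod.snd false
      = h ++ (t.foldl (fun a m => PySem.List.insertBy pvBStr m a) []).map pvTag2 := by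
  have hbef : PySem.List.sorted2 (h ++ t.map pvTag2) Prod.fst Prod.snd false
      = (h ++ t.map pvTag2).foldl (fun acc x => PySem.List.insertBy pvBefore x acc) [] := rfl
  rw [hbef, List.foldl_append, hh]
  have := pv_foldl_insert_prefix pvBefore (t.map pvTag2) h (pv_tag2_not_before h hy t) []
  simp only [List.append_nil] at this
  rw [this]
  have hmap := pv_foldl_insert_map t []
  simp only [List.map_nil] at hmap
  rw [hmap]

-- pvMerge returns a permutation of its two inputs appended
theorem pv_merge_perm (xs ys : List String) : (pvMerge xs ys).Perm (xs ++ ys) := by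
  induction xs, ys using pvMerge.induct with
  | case1 ys => simp [pvMerge]
  | case2 x xs => simp [pvMerge]
  | case3 x xs y ys h ih =>
    simp only [pvMerge, if_pos h]
    exact (ih.cons x)
  | case4 x xs y ys h ih =>
    simp only [pvMerge, if_neg h]
    exact (ih.cons y).trans List.perm_middle.symm

-- pvMerge of two sorted lists is sorted
theorem pv_merge_pairwise (xs ys : List String)
    (hx : xs.Pairwise (· ≤ ·)) (hy : ys.Pairwise (· ≤ ·)) :
    (pvMerge xs ys).Pairwise (· ≤ ·) := by
  induction xs, ys using pvMerge.induct with
  | case1 ys => simpa [pvMerge] using hy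
  | case2 x xs => simpa [pvMerge] using hx
  | case3 x xs y ys h ih =>
    rw [List.pairwise_cons] at hx
    simp only [pvMerge, if_pos h]
    refine List.pairwise_cons.mpr ⟨?_, ih hx.2 hy⟩
    intro z hz
    have hz' : z ∈ xs ++ y :: ys := (pv_merge_perm xs (y :: ys)).mem_iff.mp hz
    rcases List.mem_append.mp hz' with hzx | hzy
    · exact hx.1 z hzx
    · rcases List.mem_cons.mp hzy with rfl | hzy'
      · exact h
      · exact le_trans h ((List.pairwise_cons.mp hy).1 z hzy')
  | case4 x xs y ys h ih =>
    have hyx : y ≤ x := le_of_not_ge h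
    rw [List.pairwise_cons] at hy
    simp only [pvMerge, if_neg h]
    refine List.pairwise_cons.mpr ⟨?_, ih hx hy.2⟩
    intro z hz
    have hz' : z ∈ (x :: xs) ++ ys := (pv_merge_perm (x :: xs) ys).mem_iff.mp hz
    rcases List.mem_append.mp hz' with hzx | hzy
    · rcases List.mem_cons.mp hzx with rfl | hzx'
      · exact hyx
      · exact le_trans hyx ((List.pairwise_cons.mp hx).1 z hzx')
    · exact hy.1 z hzy

theorem pv_msort_perm (xs : List String) : (pvMsort xs).Perm xs := by
  induction xs using pvMsort.induct with
  | case1 xs h => rw [pvMsort, if_pos h]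
  | case2 xs h ih1 ih2 =>
    rw [pvMsort, if_neg h]
    exact ((pv_merge_perm _ _).trans (ih1.append ih2)).trans
      (by rw [List.take_append_drop])

theorem pv_msort_pairwise (xs : List String) : (pvMsort xs).Pairwise (· ≤ ·) := by
  induction xs using pvMsort.induct with
  | case1 xs h =>
    rw [pvMsort, if_pos h]
    match xs, h with
    | [], _ => exact List.Pairwise.nil
    | [a], _ => simp
  | case2 xs h ih1 ih2 =>
    rw [pvMsort, if_neg h]
    exact pv_merge_pairwise _ _ ih1 ih2

-- the insertion-sort fold A's sorted() amounts to equals B's merge sort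
theorem pv_sorted_eq_msort (t : List String) :
    t.foldl (fun a m => PySem.List.insertBy pvBStr m a) [] = pvMsort t := by
  have h2 : PySem.List.sorted t (fun x => x) = pvMsort t :=
    PySem.List.sorted_id_eq_of_perm_of_pairwise t (pvMsort t)
      (pv_msort_perm t) (pv_msort_pairwise t)
  calc t.foldl (fun a m => PySem.List.insertBy pvBStr m a) []
      = PySem.List.sorted t (fun x => x) :=
        (PySem.List.sorted_eq_foldl_insertBy t (fun x => x)).symm
    _ = pvMsort t := h2

-- Source B's single pass, characterised: flags = membership, others = the filtered names
theorem pv_fold_state (mn : List String) :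
    ∀ (g b : Bool) (acc : List String),
    mn.foldl pvStep (g, b, acc)
      = (g || mn.contains "Gold", b || mn.contains "Base",
         acc ++ mn.filter (fun m => !(m == "Gold" || m == "Base"))) := by
  induction mn with
  | nil => intro g b acc; simp
  | cons m ms ih =>
    intro g b acc
    by_cases hg : m = "Gold"
    · subst hg
      rw [List.foldl_cons, show pvStep (g, b, acc) "Gold" = (true, b, acc) from rfl,
        ih true b acc]
      simp
    · by_cases hb : m = "Base"
      · subst hb
        rw [List.foldl_cons, show pvStep (g, b, acc) "Base" = (g, true, acc) from rfl,
          ih g true acc]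
        simp
      · rw [List.foldl_cons]
        have hstep : pvStep (g, b, acc) m = (g, b, acc ++ [m]) := by
          simp [pvStep, hg, hb]
        rw [hstep, ih g b (acc ++ [m])]
        have hgb : ("Gold" = m) = False := eq_false (fun h => hg h.symm)
        have hbb : ("Base" = m) = False := eq_false (fun h => hb h.symm)
        simp [hg, hb, hgb, hbb]

-- ===== VERDICT (by name: the statement is the Claim_ definition above) =====
theorem order_method_names_for_debug_spec : Claim_equal_order_method_names_for_debug := by
  intro mn _
  unfold Spec_order_method_names_for_debug
  unfold order_method_names_for_debug order_method_names_for_debug_alt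
  rw [pv_fold_state mn false false []]
  by_cases hg : mn.contains "Gold" <;> by_cases hb : mn.contains "Base" <;>
    simp only [hg, hb, if_true, if_false, Bool.false_or, Bool.false_eq_true] <;>
    rw [pv_foldl_append (mn.filter (fun m => !(m == "Gold" || m == "Base"))),
      ← pv_sorted_eq_msort]
  · rw [pv_sorted2_split ([((0 : Int), "Gold")] ++ [((1 : Int), "Base")])
      (by decide) (by decide)]
    simp [Function.comp_def, pvTag2]
  · rw [pv_sorted2_split [((0 : Int), "Gold")] (by decide) (by decide)]
    simp [Function.comp_def, pvTag2]
  · rw [pv_sorted2_split ([] ++ [((1 : Int), "Base")]) (by decide) (by decide)]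
    simp [Function.comp_def, pvTag2]
  · rw [pv_sorted2_split [] (by decide) (by decide)]
    simp [Function.comp_def, pvTag2]
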